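-- pv_equiv track=rewrite | github.com/bakjunheepark/understanding_architectural_styles | evaluate_hybrids.py | style_to_class_idx
-- ===== SOURCE A (Python) =====
-- CLASSES = [
--     "Achaemenid architecture",
--     "American Foursquare architecture",
--     "American craftsman style",
--     "Ancient Egyptian architecture",
--     "Art Deco architecture",
--     "Art Nouveau architecture",
--     "Baroque architecture",
--     "Bauhaus architecture",
--     "Beaux-Arts architecture",
--     "Byzantine architecture",
--     "Chicago school architecture",
--     "Colonial architecture",
--     "Deconstructivism",
--     "Edwardian architecture",
--     "Georgian architecture",
--     "Gothic architecture",
--     "Greek Revival architecture",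
--     "International style",
--     "Novelty architecture",
--     "Palladian architecture",
--     "Postmodern architecture",
--     "Queen Anne architecture",
--     "Romanesque architecture",
--     "Russian Revival architecture",
--     "Tudor Revival architecture",
-- ]
--
-- def style_to_class_idx(style_name: str) -> int:
--     """Convert style name to class index."""
--     # Try exact match first
--     if style_name in CLASSES:
--         return CLASSES.index(style_name)
--
--     # Try case-insensitive match
--     style_lower = style_name.lower()
--     for i, cls in enumerate(CLASSES):
--         if cls.lower() == style_lower:
--             return i
--
--     # Try partial match
--     for i, cls in enumerate(CLASSES):
--         if style_lower in cls.lower() or cls.lower() in style_lower: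
--             return i
--
--     return -1  # Not found
-- ===== SOURCE B (Python) =====
-- CLASSES = [
--     "Achaemenid architecture",
--     "American Foursquare architecture",
--     "American craftsman style",
--     "Ancient Egyptian architecture",
--     "Art Deco architecture",
--     "Art Nouveau architecture",
--     "Baroque architecture",
--     "Bauhaus architecture",
--     "Beaux-Arts architecture",
--     "Byzantine architecture",
--     "Chicago school architecture",
--     "Colonial architecture",
--     "Deconstructivism",
--     "Edwardian architecture",
--     "Georgian architecture",
--     "Gothic architecture",
--     "Greek Revival architecture",
--     "International style",
--     "Novelty architecture",
--     "Palladian architecture",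
--     "Postmodern architecture",
--     "Queen Anne architecture",
--     "Romanesque architecture",
--     "Russian Revival architecture",
--     "Tudor Revival architecture",
-- ]
--
-- def style_to_class_idx(style_name: str) -> int:
--     """Convert style name to class index (single pass keeping three candidates)."""
--     sl = style_name.lower()
--     exact_idx = ci_idx = partial_idx = None
--     for i, cls in enumerate(CLASSES):
--         cl = cls.lower()
--         if exact_idx is None and cls == style_name:
--             exact_idx = i
--         if ci_idx is None and cl == sl:
--             ci_idx = i
--         if partial_idx is None and (sl in cl or cl in sl):
--             partial_idx = i
--     if exact_idx is not None:
--         return exact_idx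
--     if ci_idx is not None:
--         return ci_idx
--     if partial_idx is not None:
--         return partial_idx
--     return -1
-- ===== Notes on version B (the rewrite author's own statement) =====
-- stated objective: alternative
-- what changed: Replaces A's three sequential scans over CLASSES (exact, case-insensitive, partial) by one single pass that records the first exact, first case-insensitive and first partial match as three candidates and resolves them by priority afterwards.
import Mathlib
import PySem

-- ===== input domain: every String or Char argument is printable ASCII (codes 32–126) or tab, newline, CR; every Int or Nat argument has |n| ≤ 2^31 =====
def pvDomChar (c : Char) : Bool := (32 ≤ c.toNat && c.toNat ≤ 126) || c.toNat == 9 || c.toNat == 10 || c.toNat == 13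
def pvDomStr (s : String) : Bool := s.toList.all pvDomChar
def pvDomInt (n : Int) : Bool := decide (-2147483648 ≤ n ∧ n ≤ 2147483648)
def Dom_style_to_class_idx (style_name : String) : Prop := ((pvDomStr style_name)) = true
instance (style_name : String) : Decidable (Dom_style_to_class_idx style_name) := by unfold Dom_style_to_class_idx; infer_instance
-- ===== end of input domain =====

-- B replaces A's three sequential scans by a single pass maintaining three first-match candidates (alternative decomposition, same cost).

def CLASSES : List String := [
  "Achaemenid architecture",
  "American Foursquare architecture",
  "American craftsman style",
  "Ancient Egyptian architecture",
  "Art Deco architecture",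
  "Art Nouveau architecture",
  "Baroque architecture",
  "Bauhaus architecture",
  "Beaux-Arts architecture",
  "Byzantine architecture",
  "Chicago school architecture",
  "Colonial architecture",
  "Deconstructivism",
  "Edwardian architecture",
  "Georgian architecture",
  "Gothic architecture",
  "Greek Revival architecture",
  "International style",
  "Novelty architecture",
  "Palladian architecture",
  "Postmodern architecture",
  "Queen Anne architecture",
  "Romanesque architecture",
  "Russian Revival architecture",
  "Tudor Revival architecture"]

-- ===== PORT A =====
def style_to_class_idx (style_name : String) : Int :=
  -- `if style_name in CLASSES: return CLASSES.index(style_name)`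
  if CLASSES.contains style_name then
    match PySem.List.index? CLASSES style_name with
    | some i => (i : Int)
    | none => 0  -- unreachable: membership was just checked
  else
    let style_lower := PySem.Str.lower style_name
    -- `for i, cls in enumerate(CLASSES): if cls.lower() == style_lower: return i`
    match (PySem.List.enumerate CLASSES 0).find? (fun p => PySem.Str.lower p.2 == style_lower) with
    | some p => p.1
    | none =>
      -- `for i, cls in enumerate(CLASSES): if style_lower in cls.lower() or cls.lower() in style_lower: return i`
      match (PySem.List.enumerate CLASSES 0).find? (fun p =>
          PySem.Str.isIn style_lower (PySem.Str.lower p.2) || PySem.Str.isIn (PySem.Str.lower p.2) style_lower) with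
      | some p => p.1
      | none => -1

-- ===== PORT B =====
def style_to_class_idx_alt (style_name : String) : Int :=
  let sl := PySem.Str.lower style_name
  let st := (PySem.List.enumerate CLASSES 0).foldl
    (fun (acc : Option Int × Option Int × Option Int) p =>
      (if acc.1.isNone && (p.2 == style_name) then some p.1 else acc.1,
       if acc.2.1.isNone && (PySem.Str.lower p.2 == sl) then some p.1 else acc.2.1,
       if acc.2.2.isNone && (PySem.Str.isIn sl (PySem.Str.lower p.2) || PySem.Str.isIn (PySem.Str.lower p.2) sl) then some p.1 else acc.2.2))
    (none, none, none)
  match st.1 with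
  | some i => i
  | none =>
    match st.2.1 with
    | some i => i
    | none =>
      match st.2.2 with
      | some i => i
      | none => -1

-- ===== PRECONDITION & SPEC =====
def Spec_style_to_class_idx (style_name : String) (out : Int) : Prop := out = style_to_class_idx_alt style_name
instance (style_name : String) (out : Int) : Decidable (Spec_style_to_class_idx style_name out) := by unfold Spec_style_to_class_idx; infer_instance

-- ===== CLAIM (what is proved, stated in full; the proofs are below) =====
def Claim_equal_style_to_class_idx : Prop := ∀ (style_name : String), Dom_style_to_class_idx style_name → Spec_style_to_class_idx style_name (style_to_class_idx style_name)

-- ===== LEMMAS AND PROOFS =====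

-- the single fold of B computes, in each component, the first index satisfying its predicate
theorem tri_fold_spec (p1 p2 p3 : (Int × String) → Bool) (L : List (Int × String))
    (a b c : Option Int) :
    L.foldl
      (fun (acc : Option Int × Option Int × Option Int) p =>
        (if acc.1.isNone && p1 p then some p.1 else acc.1,
         if acc.2.1.isNone && p2 p then some p.1 else acc.2.1,
         if acc.2.2.isNone && p3 p then some p.1 else acc.2.2))
      (a, b, c)
    = (a.or ((L.find? p1).map (·.1)),
       b.or ((L.find? p2).map (·.1)),
       c.or ((L.find? p3).map (·.1))) := by
  induction L generalizing a b c with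
  | nil => simp
  | cons x L ih =>
    simp only [List.foldl_cons, ih, List.find?_cons]
    by_cases h1 : p1 x = true <;> by_cases h2 : p2 x = true <;> by_cases h3 : p3 x = true <;>
      cases a <;> cases b <;> cases c <;>
      simp [h1, h2, h3, Option.or]

-- the first index of the pair found in an enumeration is the index? of the value, shifted
theorem find_enum_eq (L : List String) (v : String) (s0 : Int) :
    ((PySem.List.enumerate L s0).find? (fun p => p.2 == v)).map (·.1)
      = (PySem.List.index? L v).map (fun n => s0 + (n : Int)) := by
  induction L generalizing s0 with
  | nil => simp [PySem.List.enumerate]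
  | cons x L ih =>
    rw [PySem.List.enumerate_cons]
    by_cases h : x = v
    · subst h
      rw [List.find?_cons_of_pos (by simp), PySem.List.index?_cons_self]
      simp
    · rw [List.find?_cons_of_neg (by simp [h]), ih, PySem.List.index?_cons_of_ne _ h]
      cases PySem.List.index? L v
      · simp
      · simp
        ring

set_option maxHeartbeats 1000000 in
theorem style_to_class_idx_eq (style_name : String) :
    style_to_class_idx style_name = style_to_class_idx_alt style_name := by
  unfold style_to_class_idx style_to_class_idx_alt
  simp only [tri_fold_spec, Option.none_or]
  have h1 := find_enum_eq CLASSES style_name 0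
  by_cases hc : CLASSES.contains style_name = true
  · -- exact match exists: A returns index?, B's first candidate is the same index
    rw [if_pos hc]
    have hm : style_name ∈ CLASSES := by simpa using hc
    obtain ⟨k, hk⟩ := Option.isSome_iff_exists.1
      ((PySem.List.index?_isSome_iff CLASSES style_name).2 hm)
    rw [h1, hk]
    simp
  · -- no exact match: the remaining two scans of A are B's other two candidates
    rw [if_neg hc]
    have hm : style_name ∉ CLASSES := by simpa using hc
    have hk : PySem.List.index? CLASSES style_name = none :=
      (PySem.List.index?_eq_none_iff _ _).2 hm
    rw [h1, hk]
    cases (PySem.List.enumerate CLASSES 0).find?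
        (fun p => PySem.Str.lower p.2 == PySem.Str.lower style_name) <;>
      cases (PySem.List.enumerate CLASSES 0).find? (fun p =>
          PySem.Str.isIn (PySem.Str.lower style_name) (PySem.Str.lower p.2) ||
          PySem.Str.isIn (PySem.Str.lower p.2) (PySem.Str.lower style_name)) <;>
      simp

-- ===== VERDICT (by name: the statement is the Claim_ definition above) =====
theorem style_to_class_idx_spec : Claim_equal_style_to_class_idx := by
  intro s _
  unfold Spec_style_to_class_idx
  exact style_to_class_idx_eq s
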